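-- pv_equiv track=rewrite | github.com/vladgoje/ai | lab1_p1.py | solveP1
-- ===== SOURCE A (Python) =====
-- def solveP1(text):
--     '''
--     Determina ultimul cuvant dpdv alfabetic dintr-un text
--     input: string - textul
--     output: ultimul cuvant
--             - string vid daca textul dat e vid
--     '''
--     if text == "":
--         return ""
--
--     split = text.split(" ")
--     last = split[0]
--
--     for word in split:
--         if word > last:
--             last = word
--
--     return last
-- ===== SOURCE B (Python) =====
-- def solveP1(text):
--     if text == "":
--         return ""
--     return sorted(text.split(" "))[-1]
-- ===== Notes on version B (the rewrite author's own statement) =====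
-- stated objective: alternative
-- what changed: Replaces the explicit max-scan loop over the word list by sorting the words and taking the last element of the sorted list.
import Mathlib
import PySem

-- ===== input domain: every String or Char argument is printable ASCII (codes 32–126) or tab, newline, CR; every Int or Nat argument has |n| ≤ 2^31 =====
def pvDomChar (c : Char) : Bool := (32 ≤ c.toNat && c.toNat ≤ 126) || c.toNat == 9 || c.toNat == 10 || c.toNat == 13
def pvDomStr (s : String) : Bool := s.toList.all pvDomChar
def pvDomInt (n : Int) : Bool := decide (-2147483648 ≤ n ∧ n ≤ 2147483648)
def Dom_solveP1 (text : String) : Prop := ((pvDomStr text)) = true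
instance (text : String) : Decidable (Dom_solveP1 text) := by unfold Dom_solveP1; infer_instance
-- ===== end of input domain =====

-- B replaces A's linear max-scan over the words with sort-then-take-last (alternative decomposition, not faster).

-- ===== PORT A =====
def solveP1 (text : String) : String :=
  if text = "" then ""
  else
    -- text.split(" "); split? is none only for sep = "", impossible here
    let split := (PySem.Str.split? text " ").getD []
    -- split[0]; split is never empty (str.split on a nonempty separator), so headD's default is unreachable
    let last := split.headD ""
    split.foldl (fun last word => if last < word then word else last) last

-- ===== PORT B =====
def solveP1_alt (text : String) : String :=
  if text = "" then ""
  else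
    let words := (PySem.Str.split? text " ").getD []   -- sep = " " ≠ "", getD unreachable
    let sws := PySem.List.sorted words (fun w => w) false
    -- sorted(words)[-1]; the list is never empty, so the none branch is unreachable
    match PySem.List.pyGet? sws (-1) with
    | some w => w
    | none => ""

-- ===== PRECONDITION & SPEC =====
def Spec_solveP1 (text : String) (out : String) : Prop := out = solveP1_alt text
instance (text : String) (out : String) : Decidable (Spec_solveP1 text out) := by unfold Spec_solveP1; infer_instance

-- ===== CLAIM (what is proved, stated in full; the proofs are below) =====
def Claim_equal_solveP1 : Prop := ∀ (text : String), Dom_solveP1 text → Spec_solveP1 text (solveP1 text)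

-- ===== LEMMAS AND PROOFS =====

lemma go_ne_nil (sep : List Char) : ∀ (fuel : Nat) (l cur : List Char) (acc : List (List Char)),
    PySem.Chars.splitOn.go sep fuel l cur acc ≠ [] := by
  intro fuel
  induction fuel with
  | zero => intro l cur acc; simp [PySem.Chars.splitOn.go]
  | succ n ih =>
    intro l cur acc
    cases l with
    | nil => simp [PySem.Chars.splitOn.go]
    | cons c rest =>
      rw [PySem.Chars.splitOn.go]
      split_ifs with h
      · exact ih _ _ _
      · exact ih _ _ _

lemma splitOn_ne_nil (s sep : List Char) : PySem.Chars.splitOn s sep ≠ [] :=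
  go_ne_nil sep _ s [] []

-- the fold in A computes an upper bound that is a member of a :: t
lemma foldl_is_max (t : List String) (a : String) :
    (t.foldl (fun x w => if x < w then w else x) a) ∈ a :: t ∧
    ∀ b ∈ a :: t, b ≤ t.foldl (fun x w => if x < w then w else x) a := by
  induction t generalizing a with
  | nil => simp
  | cons c rest ih =>
    simp only [List.foldl_cons]
    by_cases h : a < c
    · simp only [if_pos h]
      obtain ⟨hm, hb⟩ := ih c
      refine ⟨List.mem_cons_of_mem a hm, ?_⟩
      intro b hb'
      rw [List.mem_cons, List.mem_cons] at hb'
      rcases hb' with hb' | hb' | hb'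
      · exact le_of_lt (lt_of_lt_of_le (hb' ▸ h) (hb c List.mem_cons_self))
      · exact hb' ▸ hb c List.mem_cons_self
      · exact hb b (List.mem_cons_of_mem _ hb')
    · simp only [if_neg h]
      obtain ⟨hm, hb⟩ := ih a
      refine ⟨?_, ?_⟩
      · rcases List.mem_cons.mp hm with h1 | h1
        · exact List.mem_cons.mpr (Or.inl h1)
        · exact List.mem_cons_of_mem a (List.mem_cons_of_mem c h1)
      · intro b hb'
        rw [List.mem_cons, List.mem_cons] at hb'
        rcases hb' with hb' | hb' | hb'
        · exact hb' ▸ hb a List.mem_cons_self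
        · exact le_trans (le_of_not_gt (hb' ▸ h)) (hb a List.mem_cons_self)
        · exact hb b (List.mem_cons_of_mem _ hb')

lemma le_getLast {l : List String} (hp : l.Pairwise (· ≤ ·)) (hne : l ≠ []) :
    ∀ b ∈ l, b ≤ l.getLast hne := by
  induction l with
  | nil => simp
  | cons a t ih =>
    intro b hb
    cases t with
    | nil =>
      rw [List.mem_singleton] at hb
      simp [hb, List.getLast]
    | cons c r =>
      rw [List.getLast_cons (by simp)]
      obtain ⟨hhead, htail⟩ := List.pairwise_cons.mp hp
      rcases List.mem_cons.mp hb with hb | hb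
      · exact hb ▸ hhead _ (List.getLast_mem (by simp))
      · exact ih htail (by simp) b hb

lemma getLast_sorted_is_max (l : List String) (hne : l ≠ []) :
    (PySem.List.sorted l (fun w => w) false).getLast
        (by simpa [PySem.List.sorted_eq_nil_iff] using hne) ∈ l ∧
    ∀ b ∈ l, b ≤ (PySem.List.sorted l (fun w => w) false).getLast
        (by simpa [PySem.List.sorted_eq_nil_iff] using hne) := by
  have hperm := PySem.List.sorted_perm l (fun w => w) false
  have hp := PySem.List.sorted_pairwise l (fun w => w)
  have hsne : PySem.List.sorted l (fun w => w) false ≠ [] := by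
    simpa [PySem.List.sorted_eq_nil_iff] using hne
  constructor
  · exact hperm.mem_iff.mp (List.getLast_mem hsne)
  · intro b hb
    exact le_getLast hp hsne b (hperm.mem_iff.mpr hb)

lemma pyGet?_neg_one {α : Type} (l : List α) (h : l ≠ []) :
    PySem.List.pyGet? l (-1) = some (l.getLast h) := by
  have hlen : 1 ≤ l.length := List.length_pos_iff.mpr h
  simp only [PySem.List.pyGet?, PySem.List.pyIdx?]
  rw [if_neg (by omega), if_pos (by omega)]
  rw [List.getLast_eq_getElem]
  simp

lemma split_space_eq (text : String) :
    (PySem.Str.split? text " ").getD [] =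
      (PySem.Chars.splitOn text.toList " ".toList).map String.ofList := by
  simp [PySem.Str.split?, PySem.Chars.split?]

lemma split_space_ne_nil (text : String) :
    (PySem.Str.split? text " ").getD [] ≠ [] := by
  rw [split_space_eq]
  simp [splitOn_ne_nil]

-- ===== VERDICT (by name: the statement is the Claim_ definition above) =====
theorem solveP1_spec : Claim_equal_solveP1 := by
  intro text _
  unfold Spec_solveP1 solveP1 solveP1_alt
  by_cases ht : text = ""
  · simp [ht]
  · simp only [if_neg ht]
    obtain ⟨h, t, hl⟩ : ∃ h t, (PySem.Str.split? text " ").getD [] = h :: t := by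
      cases hc : (PySem.Str.split? text " ").getD [] with
      | nil => exact absurd hc (split_space_ne_nil text)
      | cons x xs => exact ⟨x, xs, rfl⟩
    rw [hl]
    have hsne : PySem.List.sorted (h :: t) (fun w => w) false ≠ [] := by
      simp [PySem.List.sorted_eq_nil_iff]
    rw [pyGet?_neg_one _ hsne]
    simp only [List.headD_cons, List.foldl_cons, if_neg (lt_irrefl h)]
    obtain ⟨hamem, hale⟩ := foldl_is_max t h
    obtain ⟨hbmem, hble⟩ := getLast_sorted_is_max (h :: t) (by simp)
    exact le_antisymm (hble _ hamem) (hale _ hbmem)
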